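-- pv_equiv track=rewrite | github.com/gilesknap/peyote-pattern | peyote/patterns.py | stripe_horizontal
-- ===== SOURCE A (Python) =====
-- def stripe_horizontal(columns: int, rows: int,
--                       widths: list[int] | None = None,
--                       colors: list[int] | None = None) -> list[list[int]]:
--     """Horizontal stripes repeating vertically.
--
--     Args:
--         widths: Row count per stripe band (default [3, 3]).
--         colors: Color index per band (default [1, 0]).
--     """
--     if widths is None:
--         widths = [3, 3]
--     if colors is None:
--         colors = [1, 0]
--     grid = []
--     band_idx = 0
--     band_row = 0
--     for _ in range(rows):
--         grid.append([colors[band_idx % len(colors)]] * columns)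
--         band_row += 1
--         if band_row >= widths[band_idx % len(widths)]:
--             band_row = 0
--             band_idx += 1
--     return grid
-- ===== SOURCE B (Python) =====
-- def stripe_horizontal(columns: int, rows: int,
--                       widths: list[int] | None = None,
--                       colors: list[int] | None = None) -> list[list[int]]:
--     """Horizontal stripes repeating vertically, built band by band."""
--     if widths is None:
--         widths = [3, 3]
--     if colors is None:
--         colors = [1, 0]
--     grid = []
--     b = 0
--     while len(grid) < rows:
--         color = colors[b % len(colors)]
--         count = max(widths[b % len(widths)], 1)
--         take = min(count, rows - len(grid))
--         grid.extend([[color] * columns for _ in range(take)])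
--         b += 1
--     return grid
-- ===== Notes on version B (the rewrite author's own statement) =====
-- stated objective: alternative
-- what changed: B loops over stripe bands and emits each band's rows in one block (min(count, remaining) rows per iteration), replacing A's per-row loop with band_idx/band_row counters.
import Mathlib
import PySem

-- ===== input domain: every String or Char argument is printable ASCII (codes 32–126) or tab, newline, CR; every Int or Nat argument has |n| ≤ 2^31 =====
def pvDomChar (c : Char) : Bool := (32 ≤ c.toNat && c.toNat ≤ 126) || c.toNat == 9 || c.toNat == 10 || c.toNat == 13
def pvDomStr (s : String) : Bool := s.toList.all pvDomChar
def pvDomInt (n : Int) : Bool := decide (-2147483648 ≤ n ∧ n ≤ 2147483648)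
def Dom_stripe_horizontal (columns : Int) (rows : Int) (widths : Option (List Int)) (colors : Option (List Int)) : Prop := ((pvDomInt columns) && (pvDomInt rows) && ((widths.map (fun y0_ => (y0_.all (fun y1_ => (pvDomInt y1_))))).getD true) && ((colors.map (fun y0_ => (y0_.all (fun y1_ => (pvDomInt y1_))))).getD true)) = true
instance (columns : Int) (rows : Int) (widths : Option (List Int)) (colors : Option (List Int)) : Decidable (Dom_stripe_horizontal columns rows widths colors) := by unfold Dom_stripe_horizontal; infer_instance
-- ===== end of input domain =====

-- B builds the grid band by band (one block of identical rows per loop step) instead of A's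
-- per-row loop with band_idx/band_row counters; objective: alternative decomposition, same cost.

-- ===== PORT A =====
-- A's `for _ in range(rows)` loop, state (grid, band_idx, band_row).
def stripeALoop (columns : Int) (widths colors : List Int) : Nat → List (List Int) → Int → Int → List (List Int)
  | 0, grid, _, _ => grid
  | n + 1, grid, bandIdx, bandRow =>
    let row := List.replicate columns.toNat (PySem.List.pyGetD colors (PySem.Int.mod bandIdx (colors.length : Int)) 0)
    let bandRow' := bandRow + 1
    if bandRow' ≥ PySem.List.pyGetD widths (PySem.Int.mod bandIdx (widths.length : Int)) 0 then
      stripeALoop columns widths colors n (grid ++ [row]) (bandIdx + 1) 0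
    else
      stripeALoop columns widths colors n (grid ++ [row]) bandIdx bandRow'

def stripe_horizontal (columns : Int) (rows : Int) (widths : Option (List Int)) (colors : Option (List Int)) : List (List Int) :=
  let widths := widths.getD [3, 3]
  let colors := colors.getD [1, 0]
  stripeALoop columns widths colors rows.toNat [] 0 0

-- ===== PORT B =====
-- B's `while len(grid) < rows` band loop; `remaining` = rows - len(grid).
def stripeBLoop (columns : Int) (widths colors : List Int) (b : Int) (remaining : Nat) : List (List Int) :=
  match remaining with
  | 0 => []
  | k + 1 =>
    let color := PySem.List.pyGetD colors (PySem.Int.mod b (colors.length : Int)) 0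
    let count := (max (PySem.List.pyGetD widths (PySem.Int.mod b (widths.length : Int)) 0) 1).toNat
    let take := min count (k + 1)
    List.replicate take (List.replicate columns.toNat color) ++
      stripeBLoop columns widths colors (b + 1) (k + 1 - take)
termination_by remaining
decreasing_by simp_wf

def stripe_horizontal_alt (columns : Int) (rows : Int) (widths : Option (List Int)) (colors : Option (List Int)) : List (List Int) :=
  let widths := widths.getD [3, 3]
  let colors := colors.getD [1, 0]
  stripeBLoop columns widths colors 0 rows.toNat

-- ===== PRECONDITION & SPEC =====
-- Pre_ excludes only inputs where Python A raises ZeroDivisionError: rows > 0 with an explicit empty widths or colors list.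
def Pre_stripe_horizontal (columns : Int) (rows : Int) (widths : Option (List Int)) (colors : Option (List Int)) : Prop :=
  0 < rows → (widths ≠ some [] ∧ colors ≠ some [])
instance (columns : Int) (rows : Int) (widths : Option (List Int)) (colors : Option (List Int)) : Decidable (Pre_stripe_horizontal columns rows widths colors) := by unfold Pre_stripe_horizontal; infer_instance

def pvWitness_stripe_horizontal : Int × Int × Option (List Int) × Option (List Int) := (4, 7, some [2, 1], none)

def Spec_stripe_horizontal (columns : Int) (rows : Int) (widths : Option (List Int)) (colors : Option (List Int)) (out : List (List Int)) : Prop := out = stripe_horizontal_alt columns rows widths colors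
instance (columns : Int) (rows : Int) (widths : Option (List Int)) (colors : Option (List Int)) (out : List (List Int)) : Decidable (Spec_stripe_horizontal columns rows widths colors out) := by unfold Spec_stripe_horizontal; infer_instance

-- ===== CLAIM (what is proved, stated in full; the proofs are below) =====
def Claim_equal_stripe_horizontal : Prop := ∀ (columns : Int) (rows : Int) (widths : Option (List Int)) (colors : Option (List Int)), Dom_stripe_horizontal columns rows widths colors → Pre_stripe_horizontal columns rows widths colors → Spec_stripe_horizontal columns rows widths colors (stripe_horizontal columns rows widths colors)

-- ===== LEMMAS AND PROOFS =====

-- A's loop consumes a whole band of j rows (j = the band's positive width) starting at band_row br.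
theorem stripeALoop_band (columns : Int) (widths colors : List Int) :
    ∀ (j : Nat), 0 < j → ∀ (n : Nat) (grid : List (List Int)) (bi br : Int),
      br + (j : Int) = PySem.List.pyGetD widths (PySem.Int.mod bi (widths.length : Int)) 0 →
      stripeALoop columns widths colors n grid bi br =
        (if n ≤ j then
          grid ++ List.replicate n (List.replicate columns.toNat (PySem.List.pyGetD colors (PySem.Int.mod bi (colors.length : Int)) 0))
        else
          stripeALoop columns widths colors (n - j)
            (grid ++ List.replicate j (List.replicate columns.toNat (PySem.List.pyGetD colors (PySem.Int.mod bi (colors.length : Int)) 0)))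
            (bi + 1) 0) := by
  intro j
  induction j with
  | zero => intro h; omega
  | succ j ih =>
    intro _ n grid bi br hw
    cases n with
    | zero => simp [stripeALoop]
    | succ k =>
      by_cases hj : j = 0
      · subst hj
        -- band of width exactly br+1: the step resets
        simp only [stripeALoop]
        rw [if_pos (by omega)]
        cases k with
        | zero => simp [stripeALoop]
        | succ m => rw [if_neg (by omega)]; simp
      · -- br + 1 < width: stay in the band, use ih at br+1
        simp only [stripeALoop]
        rw [if_neg (by omega)]
        rw [ih (by omega) k (grid ++ [List.replicate columns.toNat (PySem.List.pyGetD colors (PySem.Int.mod bi (colors.length : Int)) 0)]) bi (br + 1) (by push_cast at hw ⊢; omega)]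
        by_cases hk : k ≤ j
        · rw [if_pos hk, if_pos (by omega)]
          simp [List.replicate_succ]
        · rw [if_neg hk, if_neg (by omega)]
          simp only [List.replicate_succ, List.append_assoc, List.singleton_append]
          congr 1
          omega

-- A width ≤ 0 band still yields exactly one row before the band advances.
theorem stripeALoop_band0 (columns : Int) (widths colors : List Int) (n : Nat) (grid : List (List Int)) (bi : Int)
    (hw : PySem.List.pyGetD widths (PySem.Int.mod bi (widths.length : Int)) 0 ≤ 0) :
    stripeALoop columns widths colors (n + 1) grid bi 0 =
      stripeALoop columns widths colors n
        (grid ++ [List.replicate columns.toNat (PySem.List.pyGetD colors (PySem.Int.mod bi (colors.length : Int)) 0)])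
        (bi + 1) 0 := by
  simp only [stripeALoop]
  rw [if_pos (by omega)]

-- Main invariant: from a band start, A's per-row loop equals B's band loop.
theorem stripeALoop_eq_B (columns : Int) (widths colors : List Int) :
    ∀ (n : Nat) (grid : List (List Int)) (bi : Int),
      stripeALoop columns widths colors n grid bi 0 =
        grid ++ stripeBLoop columns widths colors bi n := by
  intro n
  induction n using Nat.strong_induction_on with
  | _ n ih =>
    intro grid bi
    cases n with
    | zero => rw [stripeBLoop.eq_def]; simp [stripeALoop]
    | succ k =>
      rw [stripeBLoop.eq_def]
      set w := PySem.List.pyGetD widths (PySem.Int.mod bi (widths.length : Int)) 0 with hwdef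
      set color := PySem.List.pyGetD colors (PySem.Int.mod bi (colors.length : Int)) 0 with hcdef
      by_cases hw : w ≤ 0
      · -- count = 1, take = 1
        have htake : min (max w 1).toNat (k + 1) = 1 := by omega
        rw [stripeALoop_band0 columns widths colors k grid bi hw]
        rw [ih k (by omega)]
        simp [htake, ← hcdef]
      · -- width ≥ 1: A eats a band of w.toNat rows
        have hj : 0 < w.toNat := by omega
        rw [stripeALoop_band columns widths colors w.toNat hj (k + 1) grid bi 0 (by omega)]
        have hcnt : (max w 1).toNat = w.toNat := by omega
        by_cases hk : k + 1 ≤ w.toNat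
        · rw [if_pos hk]
          have htake : min (max w 1).toNat (k + 1) = k + 1 := by omega
          simp [htake, stripeBLoop, ← hcdef]
        · rw [if_neg hk]
          rw [ih (k + 1 - w.toNat) (by omega)]
          have htake : min (max w 1).toNat (k + 1) = w.toNat := by omega
          simp [htake, ← hcdef]

-- ===== VERDICT (by name: the statement is the Claim_ definition above) =====
theorem stripe_horizontal_spec : Claim_equal_stripe_horizontal := by
  intro columns rows widths colors _ _
  unfold Spec_stripe_horizontal stripe_horizontal stripe_horizontal_alt
  exact stripeALoop_eq_B columns (widths.getD [3, 3]) (colors.getD [1, 0]) rows.toNat [] 0
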